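-- pv_equiv track=rewrite | github.com/JeonSol-Kor/PracticeAlgorithm | 프로그래머스/1/42862. 체육복/체육복.py | solution
-- ===== SOURCE A (Python) =====
-- def solution(n, lost, reserve):
--     answer = n
--     stds = [0] * n
--
--     for lo in lost:
--         stds[lo-1] -= 1
--
--     for re in reserve:
--         stds[re-1] += 1
--
--     for i in range(n):
--         if stds[i] == -1:
--             if i > 0 and stds[i-1] == 1:
--                 stds[i-1] -= 1
--                 stds[i] += 1
--             elif i < n-1 and stds[i+1] == 1:
--                 stds[i] += 1
--                 stds[i+1] -= 1
--             else:
--                 answer -= 1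
--
--     return answer
-- ===== SOURCE B (Python) =====
-- def solution(n, lost, reserve):
--     balance = [0] * n
--     for x in lost:
--         balance[x - 1] -= 1
--     for x in reserve:
--         balance[x - 1] += 1
--     matched = 0
--     needy = 0
--     state = 0   # 1: the previous slot holds an unused spare, -1: a still-needy student
--     for v in balance:
--         if v == -1:
--             needy += 1
--             if state == 1:
--                 matched += 1
--                 state = 0
--             else:
--                 state = -1
--         elif v == 1:
--             if state == -1:
--                 matched += 1
--                 state = 0
--             else:
--                 state = 1
--         else:
--             state = 0
--     return n - needy + matched
-- ===== Notes on version B (the rewrite author's own statement) =====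
-- stated objective: alternative
-- what changed: Keeps the 1-based tally of the balance array but replaces A's in-place repair sweep over range(n) - which re-reads and mutates the neighbouring cells i-1 and i+1 and decrements the answer on each failure - by a pure single pass of a three-state automaton over the balance values (remembering only whether the previous cell holds an unused spare or a still-needy student), counting needy students and adjacent matches with no mutation or index arithmetic.
import Mathlib
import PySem

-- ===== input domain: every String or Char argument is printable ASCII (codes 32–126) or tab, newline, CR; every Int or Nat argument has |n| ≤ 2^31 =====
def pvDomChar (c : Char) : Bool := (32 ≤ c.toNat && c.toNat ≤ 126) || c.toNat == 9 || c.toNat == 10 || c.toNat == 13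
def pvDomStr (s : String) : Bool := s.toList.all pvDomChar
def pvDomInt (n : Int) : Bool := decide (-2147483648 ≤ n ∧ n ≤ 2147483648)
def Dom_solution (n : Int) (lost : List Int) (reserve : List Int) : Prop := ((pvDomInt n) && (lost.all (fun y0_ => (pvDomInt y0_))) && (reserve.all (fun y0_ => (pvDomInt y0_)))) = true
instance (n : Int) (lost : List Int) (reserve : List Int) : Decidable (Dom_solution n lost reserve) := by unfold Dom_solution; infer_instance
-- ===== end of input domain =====

-- B replaces A's in-place repair sweep (random access and mutation of the cells i-1, i, i+1,
-- decrementing the answer on failure) by a pure single pass of a three-state automaton over the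
-- balance values, counting needy students and adjacent matches; equal to A wherever A returns.

-- ===== PORT A =====
-- Python list indexing on a Lean Array (same index-resolution rule as PySem.List.pyGetD/pySetD,
-- via PySem.List.pyIdx?; the total forms: out-of-range reads give the default, writes do nothing —
-- exact wherever Python does not raise, and Pre_solution excludes the raising inputs)
def pyGetDA (xs : Array Int) (i : Int) (d : Int) : Int :=
  match PySem.List.pyIdx? xs.size i with
  | some k => xs.getD k d
  | none => d

def pySetDA (xs : Array Int) (i : Int) (v : Int) : Array Int :=
  match PySem.List.pyIdx? xs.size i with
  | some k => xs.setIfInBounds k v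
  | none => xs

-- the body of the third loop of A (i runs over range(n)); state = (stds, answer)
def aStepArr (n : Int) (st : Array Int × Int) (i : Int) : Array Int × Int :=
  let stds := st.1
  let answer := st.2
  if pyGetDA stds i 0 = -1 then
    if 0 < i ∧ pyGetDA stds (i - 1) 0 = 1 then
      let stds := pySetDA stds (i - 1) (pyGetDA stds (i - 1) 0 - 1)
      let stds := pySetDA stds i (pyGetDA stds i 0 + 1)
      (stds, answer)
    else if i < n - 1 ∧ pyGetDA stds (i + 1) 0 = 1 then
      let stds := pySetDA stds i (pyGetDA stds i 0 + 1)
      let stds := pySetDA stds (i + 1) (pyGetDA stds (i + 1) 0 - 1)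
      (stds, answer)
    else (stds, answer - 1)
  else (stds, answer)

def solution (n : Int) (lost : List Int) (reserve : List Int) : Int :=
  let answer : Int := n
  let stds : Array Int := Array.replicate n.toNat 0
  let stds := lost.foldl (fun s lo => pySetDA s (lo - 1) (pyGetDA s (lo - 1) 0 - 1)) stds
  let stds := reserve.foldl (fun s re => pySetDA s (re - 1) (pyGetDA s (re - 1) 0 + 1)) stds
  ((PySem.List.pyRange 0 n).foldl (aStepArr n) (stds, answer)).2

-- ===== PORT B =====
-- the body of B's loop over the balance values; state = (state, matched, needy)
def bAuto (st : Int × Int × Int) (v : Int) : Int × Int × Int :=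
  if v == -1 then
    if st.1 == 1 then (0, st.2.1 + 1, st.2.2 + 1)
    else (-1, st.2.1, st.2.2 + 1)
  else if v == 1 then
    if st.1 == -1 then (0, st.2.1 + 1, st.2.2)
    else (1, st.2.1, st.2.2)
  else (0, st.2.1, st.2.2)

def solution_alt (n : Int) (lost : List Int) (reserve : List Int) : Int :=
  let balance : Array Int := Array.replicate n.toNat 0
  let balance := lost.foldl (fun s x => pySetDA s (x - 1) (pyGetDA s (x - 1) 0 - 1)) balance
  let balance := reserve.foldl (fun s x => pySetDA s (x - 1) (pyGetDA s (x - 1) 0 + 1)) balance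
  let st := balance.foldl bAuto (0, 0, 0)
  n - st.2.2 + st.2.1

-- ===== PRECONDITION & SPEC =====
-- Pre_ admits exactly the inputs on which the Python A returns: every entry of lost and reserve
-- must be a valid Python index (after negative-index resolution) into A's length-max(n,0) list;
-- on any other entry A raises IndexError (and so does B, at the same entries).
def Pre_solution (n : Int) (lost : List Int) (reserve : List Int) : Prop :=
  (∀ x ∈ lost, 1 - max n 0 ≤ x ∧ x ≤ max n 0) ∧ (∀ x ∈ reserve, 1 - max n 0 ≤ x ∧ x ≤ max n 0)
instance (n : Int) (lost : List Int) (reserve : List Int) : Decidable (Pre_solution n lost reserve) := by unfold Pre_solution; infer_instance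

def pvWitness_solution : Int × List Int × List Int := (5, [2, 4], [3])

def Spec_solution (n : Int) (lost : List Int) (reserve : List Int) (out : Int) : Prop := out = solution_alt n lost reserve
instance (n : Int) (lost : List Int) (reserve : List Int) (out : Int) : Decidable (Spec_solution n lost reserve out) := by unfold Spec_solution; infer_instance

-- ===== CLAIM (what is proved, stated in full; the proofs are below) =====
def Claim_equal_solution : Prop := ∀ (n : Int) (lost : List Int) (reserve : List Int), Dom_solution n lost reserve → Pre_solution n lost reserve → Spec_solution n lost reserve (solution n lost reserve)

-- ===== LEMMAS AND PROOFS =====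

-- the list-level mirror of aStepArr, used only by the proofs
def aStep (n : Int) (st : List Int × Int) (i : Int) : List Int × Int :=
  let stds := st.1
  let answer := st.2
  if PySem.List.pyGetD stds i 0 = -1 then
    if 0 < i ∧ PySem.List.pyGetD stds (i - 1) 0 = 1 then
      let stds := PySem.List.pySetD stds (i - 1) (PySem.List.pyGetD stds (i - 1) 0 - 1)
      let stds := PySem.List.pySetD stds i (PySem.List.pyGetD stds i 0 + 1)
      (stds, answer)
    else if i < n - 1 ∧ PySem.List.pyGetD stds (i + 1) 0 = 1 then
      let stds := PySem.List.pySetD stds i (PySem.List.pyGetD stds i 0 + 1)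
      let stds := PySem.List.pySetD stds (i + 1) (PySem.List.pyGetD stds (i + 1) 0 - 1)
      (stds, answer)
    else (stds, answer - 1)
  else (stds, answer)

lemma arr_getD_eq (a : Array Int) (k : Nat) (d : Int) : a.getD k d = a.toList.getD k d := by
  unfold Array.getD
  split
  · rw [List.getD_eq_getElem _ _ (by simpa [Array.length_toList] using ‹k < a.size›)]
    simp [Array.getElem_toList]
  · rw [List.getD_eq_default _ _ (by simp [Array.length_toList]; omega)]

lemma pyGetDA_eq (xs : Array Int) (i d : Int) : pyGetDA xs i d = PySem.List.pyGetD xs.toList i d := by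
  unfold pyGetDA PySem.List.pyGetD PySem.List.pyGet?
  rw [Array.length_toList]
  cases h : PySem.List.pyIdx? xs.size i with
  | none => simp
  | some k =>
    simp only [Option.bind_some, arr_getD_eq]
    rw [List.getD_eq_getElem?_getD]

lemma pySetDA_eq (xs : Array Int) (i v : Int) :
    (pySetDA xs i v).toList = PySem.List.pySetD xs.toList i v := by
  unfold pySetDA PySem.List.pySetD PySem.List.pySet?
  rw [Array.length_toList]
  cases h : PySem.List.pyIdx? xs.size i with
  | none => simp
  | some k => simp [Array.toList_setIfInBounds]

lemma aStepArr_bridge (n : Int) (ar : Array Int) (ans i : Int) :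
    (aStepArr n (ar, ans) i).1.toList = (aStep n (ar.toList, ans) i).1 ∧
    (aStepArr n (ar, ans) i).2 = (aStep n (ar.toList, ans) i).2 := by
  unfold aStepArr aStep
  simp only [pyGetDA_eq, pySetDA_eq]
  split_ifs <;> simp [pySetDA_eq, pyGetDA_eq]

lemma fold_bridge3 (n : Int) (l : List Int) : ∀ (ar : Array Int) (ans : Int),
    (l.foldl (aStepArr n) (ar, ans)).2 = (l.foldl (aStep n) (ar.toList, ans)).2 := by
  induction l with
  | nil => intro ar ans; rfl
  | cons x l ih =>
    intro ar ans
    simp only [List.foldl_cons]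
    obtain ⟨h1, h2⟩ := aStepArr_bridge n ar ans x
    have hpair : aStepArr n (ar, ans) x = ((aStepArr n (ar, ans) x).1, (aStepArr n (ar, ans) x).2) := rfl
    rw [hpair, ih]
    rw [h1, h2]

lemma fold_bridgeL (xs : List Int) : ∀ ar : Array Int,
    (xs.foldl (fun s lo => pySetDA s (lo - 1) (pyGetDA s (lo - 1) 0 - 1)) ar).toList
      = xs.foldl (fun s lo => PySem.List.pySetD s (lo - 1) (PySem.List.pyGetD s (lo - 1) 0 - 1)) ar.toList := by
  induction xs with
  | nil => intro ar; rfl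
  | cons x l ih =>
    intro ar
    simp only [List.foldl_cons]
    rw [ih]
    rw [pySetDA_eq, pyGetDA_eq]

lemma fold_bridgeR (xs : List Int) : ∀ ar : Array Int,
    (xs.foldl (fun s re => pySetDA s (re - 1) (pyGetDA s (re - 1) 0 + 1)) ar).toList
      = xs.foldl (fun s re => PySem.List.pySetD s (re - 1) (PySem.List.pyGetD s (re - 1) 0 + 1)) ar.toList := by
  induction xs with
  | nil => intro ar; rfl
  | cons x l ih =>
    intro ar
    simp only [List.foldl_cons]
    rw [ih]
    rw [pySetDA_eq, pyGetDA_eq]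

-- A's third loop as a pure scan over the cell values: apen cs avail = number of students
-- that stay without gym clothes, where avail says whether the previous cell holds a spare.
def apen : List Int → Bool → Int
  | [], _ => 0
  | [c], avail => if c = -1 then (if avail then 0 else 1) else 0
  | c :: d :: rest, avail =>
    if c = -1 then
      if avail then apen (d :: rest) false
      else if d = 1 then apen (0 :: rest) false
      else 1 + apen (d :: rest) false
    else apen (d :: rest) (c == 1)
termination_by xs _ => xs.length
decreasing_by all_goals (simp only [List.length_cons]; omega)

-- remove one element from a membership predicate
def rmP (R : Int → Bool) (x : Int) : Int → Bool := fun i => R i && !(decide (i = x))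

-- position scan counting FAILURES (A's decrements), positions lo, lo+1, …, lo+m-1
def pscan : Int → Nat → (Int → Bool) → (Int → Bool) → Int
  | _, 0, _, _ => 0
  | lo, m + 1, L, R =>
    if L lo then
      if R (lo - 1) then pscan (lo + 1) m L (rmP R (lo - 1))
      else if R (lo + 1) then pscan (lo + 1) m L (rmP R (lo + 1))
      else 1 + pscan (lo + 1) m L R
    else pscan (lo + 1) m L R

-- position scan counting MATCHES (B's increments), same decisions
def mscan : Int → Nat → (Int → Bool) → (Int → Bool) → Int
  | _, 0, _, _ => 0
  | lo, m + 1, L, R =>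
    if L lo then
      if R (lo - 1) then 1 + mscan (lo + 1) m L (rmP R (lo - 1))
      else if R (lo + 1) then 1 + mscan (lo + 1) m L (rmP R (lo + 1))
      else mscan (lo + 1) m L R
    else mscan (lo + 1) m L R

-- the cell list: cell p holds the net count v p
def mkCells : Int → Nat → (Int → Int) → List Int
  | _, 0, _ => []
  | lo, m + 1, v => v lo :: mkCells (lo + 1) m v

lemma mkCells_length (lo : Int) (m : Nat) (v : Int → Int) : (mkCells lo m v).length = m := by
  induction m generalizing lo with
  | zero => rfl
  | succ m ih => simp [mkCells, ih]

lemma mkCells_getElem (lo : Int) (m : Nat) (v : Int → Int) (j : Nat) (hj : j < m) :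
    (mkCells lo m v)[j]'(by rw [mkCells_length]; exact hj) = v (lo + j) := by
  induction m generalizing lo j with
  | zero => omega
  | succ m ih =>
    cases j with
    | zero => simp [mkCells]
    | succ j =>
      have hj' : j < m := by omega
      have := ih (lo + 1) j hj'
      simp only [mkCells, List.getElem_cons_succ]
      rw [this]
      have : lo + 1 + (j : Int) = lo + (j + 1 : Nat) := by push_cast; ring
      rw [this]

lemma mkCells_congr (m : Nat) (lo : Int) (v v' : Int → Int)
    (h : ∀ i, lo ≤ i → v i = v' i) : mkCells lo m v = mkCells lo m v' := by
  induction m generalizing lo with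
  | zero => rfl
  | succ m ih =>
    simp only [mkCells]
    rw [h lo le_rfl, ih (lo + 1) (fun i hi => h i (by omega))]

-- the sorted list of positions in [lo, lo+m) satisfying L
def lposs : Int → Nat → (Int → Bool) → List Int
  | _, 0, _ => []
  | lo, m + 1, L => if L lo then lo :: lposs (lo + 1) m L else lposs (lo + 1) m L

lemma drop_set_lt {α : Type} (xs : List α) (k j : Nat) (v : α) (h : k < j) :
    (xs.set k v).drop j = xs.drop j := by
  simp [List.drop_set, h]

lemma drop_set_self {α : Type} (xs : List α) (j : Nat) (v : α) (h : j < xs.length) :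
    (xs.set j v).drop j = v :: xs.drop (j + 1) := by
  rw [List.drop_set]
  simp only [Nat.lt_irrefl, if_false, Nat.sub_self]
  rw [List.drop_eq_getElem_cons h, List.set_cons_zero]

-- the heart of the A-side: A's array sweep equals the failure scan
lemma apen_eq_pscan (m : Nat) : ∀ (lo : Int) (v : Int → Int) (L R : Int → Bool),
    (∀ i, L i = (v i == -1)) → (∀ i, R i = (v i == 1)) →
    (∀ i, R i = true → i < lo + m) →
    apen (mkCells lo m v) (R (lo - 1)) = pscan lo m L R := by
  induction m with
  | zero =>
    intro lo v L R hL hR hhi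
    simp [mkCells, apen, pscan]
  | succ m ih =>
    intro lo v L R hL hR hhi
    have hlo1 : lo + 1 - 1 = lo := by ring
    have hhi' : ∀ (R' : Int → Bool), (∀ i, R' i = true → R i = true) →
        ∀ i, R' i = true → i < (lo + 1) + m := by
      intro R' himp i hi
      have := hhi i (himp i hi)
      push_cast at this ⊢
      omega
    cases hLlo : L lo with
    | false =>
      have hcne : v lo ≠ -1 := by
        intro h
        rw [hL lo, h] at hLlo
        simp at hLlo
      have hps : pscan lo (m + 1) L R = pscan (lo + 1) m L R := by
        simp [pscan, hLlo]
      rw [hps]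
      have key := ih (lo + 1) v L R hL hR (hhi' R (fun _ h => h))
      rw [hlo1] at key
      rw [← key]
      have hceq : (v lo == 1) = R lo := (hR lo).symm
      cases m with
      | zero => simp [mkCells, apen, hcne]
      | succ k =>
        simp only [mkCells, apen, if_neg hcne, hceq]
    | true =>
      have hc : v lo = -1 := by
        have h := hL lo
        rw [hLlo] at h
        exact beq_iff_eq.mp h.symm
      by_cases hav : R (lo - 1) = true
      · -- left lend
        have hvl : v (lo - 1) = 1 := by
          have h := hR (lo - 1)
          rw [hav] at h
          exact beq_iff_eq.mp h.symm
        set v' : Int → Int := fun i => if i = lo - 1 then 0 else v i with hv'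
        have hRv' : ∀ i, rmP R (lo - 1) i = (v' i == 1) := by
          intro i
          by_cases hi : i = lo - 1
          · subst hi; simp [rmP, hv']
          · simp only [rmP, hv', hi, if_neg hi, decide_eq_true_eq]
            rw [hR i]
            simp [hi]
        have hLv' : ∀ i, L i = (v' i == -1) := by
          intro i
          by_cases hi : i = lo - 1
          · subst hi
            rw [hL _, hvl]
            simp [hv']
          · rw [hL i]
            simp [hv', hi]
        have hsub : ∀ i, rmP R (lo - 1) i = true → R i = true := by
          intro i hi
          simp only [rmP, Bool.and_eq_true] at hi
          exact hi.1
        have key := ih (lo + 1) v' L (rmP R (lo - 1)) hLv' hRv' (hhi' _ hsub)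
        rw [hlo1] at key
        have hR'lo : rmP R (lo - 1) lo = false := by
          simp only [rmP]
          rw [hR lo, hc]
          simp
        rw [hR'lo] at key
        have hcong : mkCells (lo + 1) m v' = mkCells (lo + 1) m v := by
          apply mkCells_congr
          intro i hi
          simp only [hv']
          have : ¬ (i = lo - 1) := by omega
          simp [this]
        rw [hcong] at key
        have hps : pscan lo (m + 1) L R = pscan (lo + 1) m L (rmP R (lo - 1)) := by
          simp [pscan, hLlo, hav]
        rw [hps, ← key]
        cases m with
        | zero => simp [mkCells, apen, hc, hav]
        | succ k =>
          simp only [mkCells]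
          rw [hc]
          simp only [apen, if_pos rfl, hav, if_true]
      · -- no left lender
        have havf : R (lo - 1) = false := by
          cases h : R (lo - 1)
          · rfl
          · exact absurd h hav
        cases m with
        | zero =>
          have hR1 : R (lo + 1) = false := by
            cases h : R (lo + 1)
            · rfl
            · exact absurd (hhi _ h) (by push_cast; omega)
          simp [mkCells, apen, hc, havf, pscan, hLlo, hR1]
        | succ k =>
          by_cases hR1 : R (lo + 1) = true
          · -- right lend
            have hv1 : v (lo + 1) = 1 := by
              have h := hR (lo + 1)
              rw [hR1] at h
              exact beq_iff_eq.mp h.symm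
            set v' : Int → Int := fun i => if i = lo + 1 then 0 else v i with hv'
            have hRv' : ∀ i, rmP R (lo + 1) i = (v' i == 1) := by
              intro i
              by_cases hi : i = lo + 1
              · subst hi; simp [rmP, hv']
              · simp only [rmP, hv', hi, if_neg hi, decide_eq_true_eq]
                rw [hR i]
                simp [hi]
            have hLv' : ∀ i, L i = (v' i == -1) := by
              intro i
              by_cases hi : i = lo + 1
              · subst hi
                rw [hL _, hv1]
                simp [hv']
              · rw [hL i]
                simp [hv', hi]
            have hsub : ∀ i, rmP R (lo + 1) i = true → R i = true := by
              intro i hi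
              simp only [rmP, Bool.and_eq_true] at hi
              exact hi.1
            have key := ih (lo + 1) v' L (rmP R (lo + 1)) hLv' hRv' (hhi' _ hsub)
            rw [hlo1] at key
            have hR'lo : rmP R (lo + 1) lo = false := by
              simp only [rmP]
              rw [hR lo, hc]
              simp
            rw [hR'lo] at key
            have hmk : mkCells (lo + 1) (k + 1) v' = 0 :: mkCells (lo + 2) k v := by
              simp only [mkCells]
              have h0 : v' (lo + 1) = 0 := by simp [hv']
              rw [h0]
              have hcong : mkCells (lo + 1 + 1) k v' = mkCells (lo + 1 + 1) k v := by
                apply mkCells_congr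
                intro i hi
                simp only [hv']
                have : ¬ (i = lo + 1) := by omega
                simp [this]
              rw [hcong]
              have : lo + 1 + 1 = lo + 2 := by ring
              rw [this]
            rw [hmk] at key
            have hps : pscan lo (k + 1 + 1) L R = pscan (lo + 1) (k + 1) L (rmP R (lo + 1)) := by
              simp [pscan, hLlo, havf, hR1]
            rw [hps, ← key]
            simp only [mkCells]
            rw [hc, hv1]
            simp only [apen, if_pos rfl, havf]
            have : lo + 1 + 1 = lo + 2 := by ring
            rw [this]
            simp [havf]
          · -- nobody lends: penalty
            have hd1 : v (lo + 1) ≠ 1 := by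
              intro h
              rw [hR (lo + 1), h] at hR1
              simp at hR1
            have hR1f : R (lo + 1) = false := by
              cases h : R (lo + 1)
              · rfl
              · exact absurd h hR1
            have key := ih (lo + 1) v L R hL hR (hhi' R (fun _ h => h))
            have hRlo : R lo = false := by
              rw [hR lo, hc]; simp
            rw [hlo1, hRlo] at key
            have hps : pscan lo (k + 1 + 1) L R = 1 + pscan (lo + 1) (k + 1) L R := by
              simp [pscan, hLlo, havf, hR1f]
            rw [hps, ← key]
            simp only [mkCells]
            rw [hc]
            simp only [apen, if_pos rfl, havf, if_neg hd1]
            simp [mkCells, havf]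

lemma pscan_add_mscan (m : Nat) (lo : Int) (L R : Int → Bool) :
    pscan lo m L R + mscan lo m L R = ((lposs lo m L).length : Int) := by
  induction m generalizing lo R with
  | zero => simp [pscan, mscan, lposs]
  | succ m ih =>
    simp only [pscan, mscan, lposs]
    cases hL : L lo with
    | true =>
      simp only [if_true]
      by_cases h1 : R (lo - 1) = true
      · simp only [h1, if_true, List.length_cons]
        have := ih (lo + 1) (rmP R (lo - 1))
        push_cast at this ⊢
        omega
      · simp only [h1, if_false]
        by_cases h2 : R (lo + 1) = true
        · simp only [h2, if_true, List.length_cons]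
          have := ih (lo + 1) (rmP R (lo + 1))
          push_cast at this ⊢
          omega
        · simp only [h2, if_false, List.length_cons]
          have := ih (lo + 1) R
          push_cast at this ⊢
          omega
    | false =>
      simp only [Bool.false_eq_true, if_false]
      exact ih (lo + 1) R

lemma apen_avail (rest : List Int) : apen (-1 :: rest) true = apen rest false := by
  cases rest <;> simp [apen]

lemma apen_skip (c : Int) (h : c ≠ -1) (rest : List Int) (a : Bool) :
    apen (c :: rest) a = apen rest (c == 1) := by
  cases rest <;> simp [apen, h]

lemma apen_right (rest : List Int) : apen (-1 :: 1 :: rest) false = apen (0 :: rest) false := by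
  simp [apen]

lemma apen_pen (rest : List Int) (h : rest.head? ≠ some 1) :
    apen (-1 :: rest) false = 1 + apen rest false := by
  cases rest with
  | nil => simp [apen]
  | cons d rest' =>
    have hd : d ≠ 1 := by intro h'; rw [h'] at h; exact h rfl
    simp [apen, hd]

-- A's range(n) loop equals apen on the remaining cells
lemma getD_set_ne (xs : List Int) (k j : Nat) (v : Int) (h : k ≠ j) :
    (xs.set k v).getD j 0 = xs.getD j 0 := by
  simp [List.getD_eq_getElem?_getD, List.getElem?_set_ne h]

lemma getD_set_self (xs : List Int) (j : Nat) (v : Int) (h : j < xs.length) :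
    (xs.set j v).getD j 0 = v := by
  simp [List.getD_eq_getElem?_getD, List.getElem?_set_self h]

lemma aloop (m : Nat) : ∀ (i : Nat) (stds : List Int) (answer : Int) (n : Int),
    (stds.length : Int) = n → i + m = stds.length →
    ((PySem.List.pyRange (i : Int) n).foldl (aStep n) (stds, answer)).2
      = answer - apen (stds.drop i) (decide (0 < i) && decide (stds.getD (i - 1) 0 = 1)) := by
  induction m with
  | zero =>
    intro i stds answer n hn hi
    have hr : PySem.List.pyRange (i : Int) n = [] := by
      simp [PySem.List.pyRange]; omega
    rw [hr]
    have hii : i = stds.length := by omega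
    subst hii
    simp [List.drop_length, apen]
  | succ m ih =>
    intro i stds answer n hn hi
    have hilen : i < stds.length := by omega
    have hlt : (i : Int) < n := by omega
    rw [PySem.List.pyRange_one_cons hlt, List.foldl_cons]
    have hcast0 : ((i : Int) + 1) = ((i + 1 : Nat) : Int) := by push_cast; ring
    rw [hcast0]
    have hgi : PySem.List.pyGetD stds (i : Int) 0 = stds.getD i 0 := PySem.List.pyGetD_natCast stds i 0
    have hgid : stds.getD i 0 = stds[i] := List.getD_eq_getElem stds 0 hilen
    have hdropi : stds.drop i = stds[i] :: stds.drop (i + 1) := List.drop_eq_getElem_cons hilen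
    have hcast1 : ((i : Int) + 1) = ((i + 1 : Nat) : Int) := by push_cast; ring
    by_cases hc : stds[i] = -1
    · -- lost student at cell i
      have h1 : PySem.List.pyGetD stds (i : Int) 0 = -1 := by rw [hgi, hgid, hc]
      have hcond1 : ((0 : Int) < (i : Int) ∧ PySem.List.pyGetD stds ((i : Int) - 1) 0 = 1)
          ↔ (0 < i ∧ stds.getD (i - 1) 0 = 1) := by
        cases i with
        | zero => simp
        | succ k =>
          have hk : ((k + 1 : Nat) : Int) - 1 = ((k : Nat) : Int) := by push_cast; ring
          rw [hk, PySem.List.pyGetD_natCast]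
          constructor
          · rintro ⟨_, h2⟩; exact ⟨Nat.succ_pos k, by simpa using h2⟩
          · rintro ⟨_, h2⟩; exact ⟨by positivity, by simpa using h2⟩
      by_cases hav : 0 < i ∧ stds.getD (i - 1) 0 = 1
      · -- lend from the left
        have havI : (0 : Int) < (i : Int) ∧ PySem.List.pyGetD stds ((i : Int) - 1) 0 = 1 := hcond1.2 hav
        have hi1 : ((i : Int) - 1) = ((i - 1 : Nat) : Int) := by push_cast; omega
        have hstep : aStep n (stds, answer) (i : Int)
            = (PySem.List.pySetD (PySem.List.pySetD stds ((i : Int) - 1) (PySem.List.pyGetD stds ((i : Int) - 1) 0 - 1)) (i : Int)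
                (PySem.List.pyGetD (PySem.List.pySetD stds ((i : Int) - 1) (PySem.List.pyGetD stds ((i : Int) - 1) 0 - 1)) (i : Int) 0 + 1), answer) := by
          simp only [aStep, h1, havI, and_self, if_pos rfl, if_true]
        rw [hstep, hi1, PySem.List.pyGetD_natCast, PySem.List.pySetD_natCast,
          PySem.List.pyGetD_natCast, PySem.List.pySetD_natCast]
        set s1 := stds.set (i - 1) (stds.getD (i - 1) 0 - 1) with hs1
        set stds2 := s1.set i (s1.getD i 0 + 1) with hstds2
        have hlens1 : s1.length = stds.length := by rw [hs1]; simp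
        have hlen2 : stds2.length = stds.length := by rw [hstds2]; simp [hlens1]
        have hg2i : stds2.getD i 0 = 0 := by
          rw [hstds2, getD_set_self _ _ _ (by omega), hs1,
            getD_set_ne _ _ _ _ (by omega), hgid, hc]
          norm_num
        have hdrop2 : stds2.drop (i + 1) = stds.drop (i + 1) := by
          rw [hstds2, drop_set_lt _ _ _ _ (by omega), hs1, drop_set_lt _ _ _ _ (by omega)]
        have key := ih (i + 1) stds2 answer n (by rw [hlen2]; exact hn) (by omega)
        simp only [Nat.add_sub_cancel] at key
        rw [key, hdrop2, hg2i]
        have havB : (decide (0 < i) && decide (stds.getD (i - 1) 0 = 1)) = true := by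
          rw [hav.2]; simp [hav.1]
        rw [havB, hdropi, hc, apen_avail]
        simp
      · -- no left lender
        have havI : ¬ ((0 : Int) < (i : Int) ∧ PySem.List.pyGetD stds ((i : Int) - 1) 0 = 1) :=
          fun h => hav (hcond1.1 h)
        have havB : (decide (0 < i) && decide (stds.getD (i - 1) 0 = 1)) = false := by
          rcases Decidable.not_and_iff_or_not.1 hav with h | h
          · simp [h]
          · rw [decide_eq_false h, Bool.and_false]
        have hcond2 : ((i : Int) < n - 1 ∧ PySem.List.pyGetD stds ((i : Int) + 1) 0 = 1)
            ↔ (i + 1 < stds.length ∧ stds.getD (i + 1) 0 = 1) := by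
          rw [hcast1, PySem.List.pyGetD_natCast]
          constructor
          · rintro ⟨h1, h2⟩; exact ⟨by omega, h2⟩
          · rintro ⟨h1, h2⟩; exact ⟨by omega, h2⟩
        by_cases hrt : i + 1 < stds.length ∧ stds.getD (i + 1) 0 = 1
        · -- lend from the right
          have hrtI := hcond2.2 hrt
          have hstep : aStep n (stds, answer) (i : Int)
              = (PySem.List.pySetD (PySem.List.pySetD stds (i : Int) (PySem.List.pyGetD stds (i : Int) 0 + 1)) ((i : Int) + 1)
                  (PySem.List.pyGetD (PySem.List.pySetD stds (i : Int) (PySem.List.pyGetD stds (i : Int) 0 + 1)) ((i : Int) + 1) 0 - 1), answer) := by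
            simp only [aStep, h1, if_pos rfl, if_neg havI, hrtI, and_self, if_true]
          rw [hstep, hcast1, PySem.List.pyGetD_natCast, PySem.List.pySetD_natCast,
            PySem.List.pyGetD_natCast, PySem.List.pySetD_natCast]
          set s1 := stds.set i (stds.getD i 0 + 1) with hs1
          set stds2 := s1.set (i + 1) (s1.getD (i + 1) 0 - 1) with hstds2
          have hlens1 : s1.length = stds.length := by rw [hs1]; simp
          have hlen2 : stds2.length = stds.length := by rw [hstds2]; simp [hlens1]
          have hmid : s1.getD (i + 1) 0 = 1 := by
            rw [hs1, getD_set_ne _ _ _ _ (by omega)]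
            exact hrt.2
          have hg2i : stds2.getD i 0 = 0 := by
            rw [hstds2, getD_set_ne _ _ _ _ (by omega), hs1,
              getD_set_self _ _ _ (by omega), hgid, hc]
            norm_num
          have hdrop2 : stds2.drop (i + 1) = 0 :: stds.drop (i + 2) := by
            rw [hstds2, hmid, drop_set_self _ _ _ (by omega), hs1,
              drop_set_lt _ _ _ _ (by omega)]
            norm_num
          have key := ih (i + 1) stds2 answer n (by rw [hlen2]; exact hn) (by omega)
          simp only [Nat.add_sub_cancel] at key
          rw [key, hdrop2, hg2i, havB, hdropi, hc]
          have hdropi1 : stds.drop (i + 1) = 1 :: stds.drop (i + 2) := by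
            have h2 := hrt.2
            rw [List.getD_eq_getElem _ _ hrt.1] at h2
            rw [List.drop_eq_getElem_cons hrt.1, h2]
          rw [hdropi1, apen_right]
          simp
        · -- nobody can lend: answer -= 1
          have hrtI : ¬ ((i : Int) < n - 1 ∧ PySem.List.pyGetD stds ((i : Int) + 1) 0 = 1) :=
            fun h => hrt (hcond2.1 h)
          have hstep : aStep n (stds, answer) (i : Int) = (stds, answer - 1) := by
            simp only [aStep, h1, if_true, if_neg havI, if_neg hrtI]
          rw [hstep]
          have key := ih (i + 1) stds (answer - 1) n hn (by omega)
          simp only [Nat.add_sub_cancel] at key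
          have hg2i : (decide (0 < i + 1) && decide (stds.getD i 0 = 1)) = false := by
            rw [hgid, hc]; simp
          rw [hg2i] at key
          rw [key, havB, hdropi, hc]
          have hhead : (stds.drop (i + 1)).head? ≠ some 1 := by
            by_cases h1' : i + 1 < stds.length
            · rw [List.drop_eq_getElem_cons h1']
              intro h'
              simp only [List.head?_cons, Option.some.injEq] at h'
              exact hrt ⟨h1', by rw [List.getD_eq_getElem _ _ h1']; exact h'⟩
            · have hnil : stds.drop (i + 1) = [] := List.drop_of_length_le (by omega)
              simp [hnil]
          rw [apen_pen _ hhead]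
          ring
    · -- not a lost student: nothing happens
      have h1 : ¬ (PySem.List.pyGetD stds (i : Int) 0 = -1) := by rw [hgi, hgid]; exact hc
      have hstep : aStep n (stds, answer) (i : Int) = (stds, answer) := by
        simp only [aStep, if_neg h1]
      rw [hstep]
      have key := ih (i + 1) stds answer n hn (by omega)
      simp only [Nat.add_sub_cancel] at key
      rw [key, hdropi, apen_skip _ hc]
      have hb : (decide (0 < i + 1) && decide (stds.getD i 0 = 1)) = (stds[i] == 1) := by
        rw [hgid]
        cases h : (stds[i] == 1)
        · simp [beq_iff_eq] at h
          simp [h]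
        · simp [beq_iff_eq] at h
          simp [h]
      rw [hb]

-- Python index resolution: an in-range index i (possibly negative) resolves to (i mod len)
lemma pyIdx_in_range (len : Nat) (i : Int) (h1 : -(len : Int) ≤ i) (h2 : i < (len : Int)) :
    PySem.List.pyIdx? len i = some ((i % (len : Int)).toNat) := by
  unfold PySem.List.pyIdx?
  by_cases h0 : 0 ≤ i
  · rw [if_pos h0, if_pos h2]
    rw [Int.emod_eq_of_lt h0 h2]
  · rw [if_neg h0, if_pos h1]
    have h4 := Int.add_mul_emod_self_left i (len : Int) 1
    have h5 : (i + (len : Int)) % (len : Int) = i + len :=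
      Int.emod_eq_of_lt (by omega) (by omega)
    have hmod : i % (len : Int) = i + len := by
      rw [mul_one] at h4
      omega
    rw [hmod]
    congr 1
    omega

lemma pymod_bounds (len : Nat) (i : Int) (h1 : -(len : Int) ≤ i) (h2 : i < (len : Int)) :
    0 ≤ i % (len : Int) ∧ i % (len : Int) < (len : Int) := by
  have hpos : 0 < (len : Int) := by omega
  exact ⟨Int.emod_nonneg i (by omega), Int.emod_lt_of_pos i hpos⟩

lemma pySetD_resolve (xs : List Int) (i v : Int) (h1 : -(xs.length : Int) ≤ i) (h2 : i < (xs.length : Int)) :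
    PySem.List.pySetD xs i v = xs.set ((i % (xs.length : Int)).toNat) v := by
  unfold PySem.List.pySetD PySem.List.pySet?
  rw [pyIdx_in_range _ _ h1 h2]
  rfl

lemma pyGetD_resolve (xs : List Int) (i d : Int) (h1 : -(xs.length : Int) ≤ i) (h2 : i < (xs.length : Int)) :
    PySem.List.pyGetD xs i d = xs.getD ((i % (xs.length : Int)).toNat) d := by
  unfold PySem.List.pyGetD PySem.List.pyGet?
  rw [pyIdx_in_range _ _ h1 h2]
  have hb := pymod_bounds _ _ h1 h2
  have hk : (i % (xs.length : Int)).toNat < xs.length := by omega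
  simp [List.getElem?_eq_getElem hk, List.getD_eq_getElem _ _ hk]

-- the two building folds: cell j ends at s[j] + δ·(number of entries resolving to index j)
lemma build_foldR {δ : Int} (len : Nat) (xs : List Int) : ∀ (s : List Int), s.length = len →
    (∀ x ∈ xs, -(len : Int) ≤ x - 1 ∧ x - 1 < (len : Int)) →
    (xs.foldl (fun s x => PySem.List.pySetD s (x - 1) (PySem.List.pyGetD s (x - 1) 0 + δ)) s).length = len ∧
    ∀ j, j < len →
      (xs.foldl (fun s x => PySem.List.pySetD s (x - 1) (PySem.List.pyGetD s (x - 1) 0 + δ)) s).getD j 0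
        = s.getD j 0 + δ * ((xs.map (fun x => (x - 1) % (len : Int))).count ((j : Nat) : Int) : Int) := by
  induction xs with
  | nil =>
    intro s hs _
    exact ⟨hs, fun j _ => by simp⟩
  | cons x xs ih =>
    intro s hs hb
    obtain ⟨hx1, hx2⟩ := hb x (by simp)
    rw [← hs] at hx1 hx2
    have hbd := pymod_bounds s.length (x - 1) hx1 hx2
    have hk : ((x - 1) % (s.length : Int)).toNat < s.length := by omega
    have hstep : PySem.List.pySetD s (x - 1) (PySem.List.pyGetD s (x - 1) 0 + δ)
        = s.set ((x - 1) % (s.length : Int)).toNat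
            (s.getD ((x - 1) % (s.length : Int)).toNat 0 + δ) := by
      rw [pySetD_resolve _ _ _ hx1 hx2, pyGetD_resolve _ _ _ hx1 hx2]
    simp only [List.foldl_cons]
    rw [hstep]
    have hs' : (s.set ((x - 1) % (s.length : Int)).toNat (s.getD ((x - 1) % (s.length : Int)).toNat 0 + δ)).length = len := by
      simp [hs]
    obtain ⟨ihlen, ihget⟩ := ih _ hs' (fun y hy => hb y (by simp [hy]))
    refine ⟨ihlen, ?_⟩
    intro j hj
    rw [ihget j hj]
    simp only [List.map_cons]
    rw [hs]
    rw [hs] at hbd hk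
    by_cases hxj : (x - 1) % (len : Int) = (j : Int)
    · have hkj : ((x - 1) % (len : Int)).toNat = j := by omega
      rw [hkj, getD_set_self _ _ _ (by omega)]
      have hcnt : ((x - 1) % (len : Int) :: xs.map (fun x => (x - 1) % (len : Int))).count ((j : Nat) : Int)
          = (xs.map (fun x => (x - 1) % (len : Int))).count ((j : Nat) : Int) + 1 := by
        simp [List.count_cons, hxj]
      rw [hcnt]
      push_cast
      ring
    · have hkj : ((x - 1) % (len : Int)).toNat ≠ j := by omega
      rw [getD_set_ne _ _ _ _ hkj]
      have hcnt : ((x - 1) % (len : Int) :: xs.map (fun x => (x - 1) % (len : Int))).count ((j : Nat) : Int)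
          = (xs.map (fun x => (x - 1) % (len : Int))).count ((j : Nat) : Int) := by
        simp [List.count_cons, hxj]
      rw [hcnt]

-- B's pass as a position scan with a one-cell memory: s = 1 means "previous position holds an
-- unused spare", s = -1 means "previous position holds a still-needy student"
def pmscan : Int → Nat → (Int → Bool) → (Int → Bool) → Int → Int
  | _, 0, _, _, _ => 0
  | lo, m + 1, L, R, s =>
    if L lo then
      (if s = 1 then 1 + pmscan (lo + 1) m L R 0 else pmscan (lo + 1) m L R (-1))
    else if R lo then
      (if s = -1 then 1 + pmscan (lo + 1) m L R 0 else pmscan (lo + 1) m L R 1)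
    else pmscan (lo + 1) m L R 0

-- the memory scan equals A's removal scan (three coupled invariants on the entry state)
lemma pm_eq (m : Nat) : ∀ (lo : Int) (L R R' : Int → Bool),
    (∀ i, L i = true → R i = false) →
    (∀ i, lo + 1 ≤ i → R' i = R i) →
    (∀ i, R i = true → i < lo + m) →
    ( (R' lo = R lo → R' (lo - 1) = true → pmscan lo m L R 1 = mscan lo m L R')
    ∧ (R' lo = R lo → R' (lo - 1) = false → pmscan lo m L R 0 = mscan lo m L R')
    ∧ (R' (lo - 1) = false → R' lo = false →
        pmscan lo m L R (-1) = mscan lo m L R' + (if 0 < m ∧ R lo = true then 1 else 0)) ) := by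
  induction m with
  | zero =>
    intro lo L R R' hdisj hagree hbound
    refine ⟨fun _ _ => rfl, fun _ _ => rfl, fun _ _ => ?_⟩
    simp [pmscan, mscan]
  | succ m ih =>
    intro lo L R R' hdisj hagree hbound
    have enorm : lo + 1 - 1 = lo := by ring
    have hagree' : ∀ i, lo + 1 + 1 ≤ i → R' i = R i := fun i hi => hagree i (by omega)
    have hbound' : ∀ i, R i = true → i < (lo + 1) + (m : Int) := by
      intro i hi
      have := hbound i hi
      push_cast at this ⊢
      omega
    have hR'1R : R' (lo + 1) = R (lo + 1) := hagree (lo + 1) (by omega)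
    refine ⟨?_, ?_, ?_⟩
    · -- entry state 1: an unused spare sits at lo-1
      intro hR'lo hR'm1
      simp only [pmscan, mscan]
      by_cases hL : L lo = true
      · have hRlo : R lo = false := hdisj lo hL
        rw [if_pos hL, if_pos hL, if_pos trivial, if_pos hR'm1]
        congr 1
        refine (ih (lo + 1) L R (rmP R' (lo - 1)) hdisj ?_ hbound').2.1 ?_ ?_
        · intro i hi
          simp only [rmP]
          rw [hagree i (by omega)]
          have : ¬ (i = lo - 1) := by omega
          simp [this]
        · simp only [rmP]
          rw [hR'1R]
          have : ¬ (lo + 1 = lo - 1) := by omega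
          simp [this]
        · rw [enorm]
          simp only [rmP]
          rw [hR'lo, hRlo]
          simp
      · rw [if_neg hL, if_neg hL]
        by_cases hR : R lo = true
        · rw [if_pos hR, if_neg (show ¬ ((1 : Int) = -1) by norm_num)]
          refine (ih (lo + 1) L R R' hdisj hagree' hbound').1 hR'1R ?_
          rw [enorm, hR'lo]
          exact hR
        · rw [if_neg hR]
          refine (ih (lo + 1) L R R' hdisj hagree' hbound').2.1 hR'1R ?_
          rw [enorm, hR'lo]
          simpa using hR
    · -- entry state 0: nothing usable at lo-1
      intro hR'lo hR'm0
      simp only [pmscan, mscan]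
      by_cases hL : L lo = true
      · have hRlo : R lo = false := hdisj lo hL
        rw [if_pos hL, if_pos hL, if_neg (show ¬ ((0 : Int) = 1) by norm_num),
          if_neg (show ¬ (R' (lo - 1) = true) by simp [hR'm0])]
        by_cases hR1 : R (lo + 1) = true
        · rw [if_pos (by rw [hR'1R]; exact hR1)]
          have hm : 0 < m := by
            have := hbound (lo + 1) hR1
            push_cast at this
            omega
          have hc := (ih (lo + 1) L R (rmP R' (lo + 1)) hdisj ?_ hbound').2.2 ?_ ?_
          · rw [hc, if_pos ⟨hm, hR1⟩]
            ring
          · intro i hi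
            simp only [rmP]
            rw [hagree i (by omega)]
            have : ¬ (i = lo + 1) := by omega
            simp [this]
          · rw [enorm]
            simp only [rmP]
            rw [hR'lo, hRlo]
            simp
          · simp [rmP]
        · rw [if_neg (by rw [hR'1R]; simpa using hR1)]
          have hc := (ih (lo + 1) L R R' hdisj hagree' hbound').2.2 ?_ ?_
          · rw [hc, if_neg (by simp [hR1])]
            ring
          · rw [enorm, hR'lo]
            simpa using hRlo
          · rw [hR'1R]
            simpa using hR1
      · rw [if_neg hL, if_neg hL]
        by_cases hR : R lo = true
        · rw [if_pos hR, if_neg (show ¬ ((0 : Int) = -1) by norm_num)]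
          refine (ih (lo + 1) L R R' hdisj hagree' hbound').1 hR'1R ?_
          rw [enorm, hR'lo]
          exact hR
        · rw [if_neg hR]
          refine (ih (lo + 1) L R R' hdisj hagree' hbound').2.1 hR'1R ?_
          rw [enorm, hR'lo]
          simpa using hR
    · -- entry state -1: an unmatched needy student sits at lo-1
      intro hR'm0 hR'0
      simp only [pmscan, mscan]
      by_cases hL : L lo = true
      · have hRlo : R lo = false := hdisj lo hL
        rw [if_pos hL, if_pos hL, if_neg (show ¬ ((-1 : Int) = 1) by norm_num),
          if_neg (show ¬ (R' (lo - 1) = true) by simp [hR'm0]),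
          if_neg (show ¬ (0 < m + 1 ∧ R lo = true) by simp [hRlo]), add_zero]
        by_cases hR1 : R (lo + 1) = true
        · rw [if_pos (by rw [hR'1R]; exact hR1)]
          have hm : 0 < m := by
            have := hbound (lo + 1) hR1
            push_cast at this
            omega
          have hc := (ih (lo + 1) L R (rmP R' (lo + 1)) hdisj ?_ hbound').2.2 ?_ ?_
          · rw [hc, if_pos ⟨hm, hR1⟩]
            ring
          · intro i hi
            simp only [rmP]
            rw [hagree i (by omega)]
            have : ¬ (i = lo + 1) := by omega
            simp [this]
          · rw [enorm]
            simp only [rmP]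
            rw [hR'0]
            simp
          · simp [rmP]
        · rw [if_neg (by rw [hR'1R]; simpa using hR1)]
          have hc := (ih (lo + 1) L R R' hdisj hagree' hbound').2.2 ?_ ?_
          · rw [hc, if_neg (by simp [hR1])]
            ring
          · rw [enorm]
            exact hR'0
          · rw [hR'1R]
            simpa using hR1
      · rw [if_neg hL, if_neg hL]
        by_cases hR : R lo = true
        · rw [if_pos hR, if_pos trivial,
            if_pos (show 0 < m + 1 ∧ R lo = true from ⟨by omega, hR⟩)]
          have hc := (ih (lo + 1) L R R' hdisj hagree' hbound').2.1 hR'1R ?_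
          · rw [hc]
            ring
          · rw [enorm]
            exact hR'0
        · rw [if_neg hR, if_neg (show ¬ (0 < m + 1 ∧ R lo = true) by simp [hR]), add_zero]
          refine (ih (lo + 1) L R R' hdisj hagree' hbound').2.1 hR'1R ?_
          rw [enorm]
          exact hR'0

-- B's automaton pass over the balance cells computes (matched, needy) = (pmscan, #lposs)
lemma bauto_pm (m : Nat) : ∀ (lo : Int) (v : Int → Int) (L R : Int → Bool) (s macc nacc : Int),
    (∀ i, L i = (v i == -1)) → (∀ i, R i = (v i == 1)) →
    ((mkCells lo m v).foldl bAuto (s, macc, nacc)).2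
      = (macc + pmscan lo m L R s, nacc + ((lposs lo m L).length : Int)) := by
  induction m with
  | zero =>
    intro lo v L R s macc nacc hL hR
    simp [mkCells, pmscan, lposs]
  | succ m ih =>
    intro lo v L R s macc nacc hL hR
    simp only [mkCells, List.foldl_cons]
    by_cases hLlo : L lo = true
    · have hv : v lo = -1 := by
        have h := hL lo
        rw [hLlo] at h
        exact beq_iff_eq.mp h.symm
      have h1 : (v lo == -1) = true := by rw [hv]; rfl
      by_cases hs : s = 1
      · have hstep : bAuto (s, macc, nacc) (v lo) = (0, macc + 1, nacc + 1) := by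
          simp [bAuto, h1, hs]
        rw [hstep, ih (lo + 1) v L R 0 (macc + 1) (nacc + 1) hL hR]
        simp only [pmscan, lposs, if_pos hLlo, if_pos hs, List.length_cons, Prod.mk.injEq]
        all_goals
          refine ⟨?_, ?_⟩ <;> (try push_cast) <;> (try ring) <;> try rfl
      · have hstep : bAuto (s, macc, nacc) (v lo) = (-1, macc, nacc + 1) := by
          simp [bAuto, h1, hs]
        rw [hstep, ih (lo + 1) v L R (-1) macc (nacc + 1) hL hR]
        simp only [pmscan, lposs, if_pos hLlo, if_neg hs, List.length_cons, Prod.mk.injEq]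
        all_goals
          refine ⟨?_, ?_⟩ <;> (try push_cast) <;> (try ring) <;> try rfl
    · by_cases hRlo : R lo = true
      · have hv : v lo = 1 := by
          have h := hR lo
          rw [hRlo] at h
          exact beq_iff_eq.mp h.symm
        have h1 : (v lo == -1) = false := by rw [hv]; rfl
        have h2 : (v lo == 1) = true := by rw [hv]; rfl
        by_cases hs : s = -1
        · have hstep : bAuto (s, macc, nacc) (v lo) = (0, macc + 1, nacc) := by
            simp [bAuto, h1, h2, hs]
          rw [hstep, ih (lo + 1) v L R 0 (macc + 1) nacc hL hR]
          simp only [pmscan, lposs, if_neg hLlo, if_pos hRlo, if_pos hs, List.length_cons,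
            Prod.mk.injEq]
          all_goals
            refine ⟨?_, ?_⟩ <;> (try push_cast) <;> (try ring) <;> try rfl
        · have hstep : bAuto (s, macc, nacc) (v lo) = (1, macc, nacc) := by
            simp [bAuto, h1, h2, hs]
          rw [hstep, ih (lo + 1) v L R 1 macc nacc hL hR]
          simp only [pmscan, lposs, if_neg hLlo, if_pos hRlo, if_neg hs, List.length_cons,
            Prod.mk.injEq]
          all_goals
            refine ⟨?_, ?_⟩ <;> (try push_cast) <;> (try ring) <;> try rfl
      · have h1 : (v lo == -1) = false := by
          rw [hL lo] at hLlo
          exact Bool.eq_false_iff.mpr (fun h => hLlo h)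
        have h2 : (v lo == 1) = false := by
          rw [hR lo] at hRlo
          exact Bool.eq_false_iff.mpr (fun h => hRlo h)
        have hstep : bAuto (s, macc, nacc) (v lo) = (0, macc, nacc) := by
          simp [bAuto, h1, h2]
        rw [hstep, ih (lo + 1) v L R 0 macc nacc hL hR]
        simp only [pmscan, lposs, if_neg hLlo, if_neg hRlo]

theorem solution_spec : Claim_equal_solution := by
  intro n lost reserve _ hpre
  obtain ⟨hlostB, hresB⟩ := hpre
  unfold Spec_solution
  by_cases hn0 : 0 ≤ n
  case neg =>
    have hlnil : lost = [] := by
      cases lost with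
      | nil => rfl
      | cons a l => have := hlostB a (by simp); omega
    have hrnil : reserve = [] := by
      cases reserve with
      | nil => rfl
      | cons a l => have := hresB a (by simp); omega
    subst hlnil; subst hrnil
    have hr : PySem.List.pyRange 0 n = [] := by
      simp [PySem.List.pyRange]; omega
    have h0 : n.toNat = 0 := by omega
    simp [solution, solution_alt, hr, h0, bAuto]
  case pos =>
    have hNn : (n.toNat : Int) = n := Int.toNat_of_nonneg hn0
    set N := n.toNat with hN
    set f : Int → Int := fun x => (x - 1) % (N : Int) with hf
    set netF : Int → Int :=
      fun p => ((reserve.map f).count p : Int) - ((lost.map f).count p : Int) with hnet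
    set L : Int → Bool := fun p => netF p == -1 with hLd
    set R : Int → Bool := fun p => netF p == 1 with hRd
    have hfbd : ∀ x, (x ∈ lost ∨ x ∈ reserve) → 0 ≤ f x ∧ f x < (N : Int) := by
      intro x hx
      have hb : 1 - max n 0 ≤ x ∧ x ≤ max n 0 := by
        rcases hx with h | h
        · exact hlostB x h
        · exact hresB x h
      simp only [hf]
      exact pymod_bounds N (x - 1) (by omega) (by omega)
    have hnetz : ∀ p : Int, ¬ (0 ≤ p ∧ p < (N : Int)) → netF p = 0 := by
      intro p hp
      have hL0 : (lost.map f).count p = 0 := by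
        rw [List.count_eq_zero]
        intro hmem
        obtain ⟨x, hx, hfx⟩ := List.mem_map.1 hmem
        have := hfbd x (Or.inl hx)
        omega
      have hR0 : (reserve.map f).count p = 0 := by
        rw [List.count_eq_zero]
        intro hmem
        obtain ⟨x, hx, hfx⟩ := List.mem_map.1 hmem
        have := hfbd x (Or.inr hx)
        omega
      simp [hnet, hL0, hR0]
    have hhiR : ∀ i, R i = true → i < 0 + (N : Int) := by
      intro i hi
      simp only [hRd, beq_iff_eq] at hi
      by_contra hout
      have := hnetz i (by omega)
      omega
    have hdisj : ∀ i, L i = true → R i = false := by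
      intro i hi
      have hv := beq_iff_eq.mp hi
      simp only [hRd, hv]
      decide
    have hRm1 : R (0 - 1 : Int) = false := by
      simp only [hRd]
      rw [hnetz (0 - 1) (by omega)]
      decide
    -- the balance cells built by the first two loops (shared by both programs)
    have hstds : reserve.foldl (fun s re => PySem.List.pySetD s (re - 1) (PySem.List.pyGetD s (re - 1) 0 + 1))
          (lost.foldl (fun s lo => PySem.List.pySetD s (lo - 1) (PySem.List.pyGetD s (lo - 1) 0 - 1))
            (List.replicate N 0))
        = mkCells 0 N netF := by
      have hfun1 : (fun (s : List Int) (lo : Int) => PySem.List.pySetD s (lo - 1) (PySem.List.pyGetD s (lo - 1) 0 - 1))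
          = (fun (s : List Int) (x : Int) => PySem.List.pySetD s (x - 1) (PySem.List.pyGetD s (x - 1) 0 + (-1))) := by
        funext s x
        congr 1
      rw [hfun1]
      have hb1 : ∀ x ∈ lost, -((N : Nat) : Int) ≤ x - 1 ∧ x - 1 < ((N : Nat) : Int) := by
        intro x hx
        have := hlostB x hx
        omega
      have hb2 : ∀ x ∈ reserve, -((N : Nat) : Int) ≤ x - 1 ∧ x - 1 < ((N : Nat) : Int) := by
        intro x hx
        have := hresB x hx
        omega
      obtain ⟨hlen1, hget1⟩ := build_foldR (δ := -1) N lost (List.replicate N (0 : Int)) (by simp) hb1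
      obtain ⟨hlen2, hget2⟩ := build_foldR (δ := 1) N reserve _ hlen1 hb2
      apply List.ext_getElem
      · rw [hlen2, mkCells_length]
      · intro j h1 h2
        have hjN : j < N := by rw [hlen2] at h1; exact h1
        have hgd := hget2 j hjN
        rw [hget1 j hjN] at hgd
        have hrep : (List.replicate N (0 : Int)).getD j 0 = 0 := by
          rw [List.getD_eq_getElem _ _ (by simpa using hjN)]
          simp
        rw [hrep] at hgd
        rw [← List.getD_eq_getElem _ 0 h1, hgd]
        rw [mkCells_getElem 0 N netF j hjN]
        have h0j : (0 : Int) + (j : Int) = (j : Int) := by ring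
        rw [h0j]
        simp only [hnet, hf]
        push_cast
        ring
    -- ===== A's side =====
    have hA : solution n lost reserve = n - pscan 0 N L R := by
      show ((PySem.List.pyRange 0 n).foldl (aStepArr n)
          (reserve.foldl (fun s re => pySetDA s (re - 1) (pyGetDA s (re - 1) 0 + 1))
            (lost.foldl (fun s lo => pySetDA s (lo - 1) (pyGetDA s (lo - 1) 0 - 1))
              (Array.replicate n.toNat 0)), n)).2 = n - pscan 0 N L R
      rw [fold_bridge3, fold_bridgeR, fold_bridgeL, Array.toList_replicate]
      rw [← hN, hstds]
      have hlen : ((mkCells 0 N netF).length : Int) = n := by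
        rw [mkCells_length]; exact hNn
      have key := aloop N 0 (mkCells 0 N netF) n n hlen (by simp [mkCells_length])
      norm_num at key
      rw [key]
      have hps := apen_eq_pscan N 0 netF L R (fun i => rfl) (fun i => rfl) hhiR
      rw [hRm1] at hps
      rw [hps]
    -- ===== B's side =====
    have hB : solution_alt n lost reserve
        = n - ((lposs 0 N L).length : Int) + mscan 0 N L R := by
      show n - ((reserve.foldl (fun s x => pySetDA s (x - 1) (pyGetDA s (x - 1) 0 + 1))
            (lost.foldl (fun s x => pySetDA s (x - 1) (pyGetDA s (x - 1) 0 - 1))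
              (Array.replicate n.toNat 0))).foldl bAuto (0, 0, 0)).2.2
          + ((reserve.foldl (fun s x => pySetDA s (x - 1) (pyGetDA s (x - 1) 0 + 1))
            (lost.foldl (fun s x => pySetDA s (x - 1) (pyGetDA s (x - 1) 0 - 1))
              (Array.replicate n.toNat 0))).foldl bAuto (0, 0, 0)).2.1
          = n - ((lposs 0 N L).length : Int) + mscan 0 N L R
      rw [← Array.foldl_toList, fold_bridgeR, fold_bridgeL, Array.toList_replicate,
        ← hN, hstds]
      have hfold := bauto_pm N 0 netF L R 0 0 0 (fun i => rfl) (fun i => rfl)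
      have hm : ((mkCells 0 N netF).foldl bAuto (0, 0, 0)).2.1 = pmscan 0 N L R 0 := by
        rw [hfold]
        ring
      have hnd : ((mkCells 0 N netF).foldl bAuto (0, 0, 0)).2.2 = ((lposs 0 N L).length : Int) := by
        rw [hfold]
        ring
      rw [hm, hnd]
      have hpm : pmscan 0 N L R 0 = mscan 0 N L R :=
        (pm_eq N 0 L R R hdisj (fun i _ => rfl) (by simpa using hhiR)).2.1 rfl hRm1
      rw [hpm]
    rw [hA, hB]
    have := pscan_add_mscan N 0 L R
    omega
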